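-- pv_equiv track=rewrite | github.com/alanbuxton/syracuse-neo | topics/geo_utils.py | sorted_country_admin1_list
-- ===== SOURCE A (Python) =====
-- COUNTRIES_WITH_REGIONS = ["AE","US","CA","CN","IN"] # Countries to be broken down to state/province
--
-- def sorted_country_admin1_list(country_names_to_id,admin1_names_to_id):
--     combined_sorted_list = [] # country name, admin1_name, country_or_admin_code
--     for country_name,country_code in sorted(country_names_to_id.items()):
--         combined_sorted_list.append( (country_name,'',country_code) )
--         if country_code in COUNTRIES_WITH_REGIONS:
--             for admin1_name,admin1_code in sorted(admin1_names_to_id[country_code].items()):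
--                 combined_sorted_list.append( (country_name, admin1_name, f"{country_code}-{admin1_code}"))
--     return combined_sorted_list
-- ===== SOURCE B (Python) =====
-- COUNTRIES_WITH_REGIONS = ["AE","US","CA","CN","IN"] # Countries to be broken down to state/province
--
-- def sorted_country_admin1_list(country_names_to_id, admin1_names_to_id):
--     # One nested comprehension producing every row, then a single whole-tuple sort.
--     # Lexicographic tuple order puts each country row (empty admin1 name) before
--     # its admin1 rows and orders those by admin1 name then "CC-code".
--     rows = [
--         (country_name, admin1_name, code)
--         for country_name, country_code in country_names_to_id.items()
--         for admin1_name, code in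
--             [('', country_code)] +
--             ([(an, f"{country_code}-{ac}") for an, ac in admin1_names_to_id[country_code].items()]
--              if country_code in COUNTRIES_WITH_REGIONS else [])
--     ]
--     return sorted(rows)
-- ===== Notes on version B (the rewrite author's own statement) =====
-- stated objective: simpler
-- what changed: B is a single nested comprehension that emits every (country_name, admin1_name, code) row unsorted, followed by one whole-tuple sort, instead of A's accumulator loop with per-level sorting (sort countries, then sort each country's admin1 block); lexicographic tuple order (empty admin1 name first, 'CC-code' third field) reproduces A's ordering.
import Mathlib
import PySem

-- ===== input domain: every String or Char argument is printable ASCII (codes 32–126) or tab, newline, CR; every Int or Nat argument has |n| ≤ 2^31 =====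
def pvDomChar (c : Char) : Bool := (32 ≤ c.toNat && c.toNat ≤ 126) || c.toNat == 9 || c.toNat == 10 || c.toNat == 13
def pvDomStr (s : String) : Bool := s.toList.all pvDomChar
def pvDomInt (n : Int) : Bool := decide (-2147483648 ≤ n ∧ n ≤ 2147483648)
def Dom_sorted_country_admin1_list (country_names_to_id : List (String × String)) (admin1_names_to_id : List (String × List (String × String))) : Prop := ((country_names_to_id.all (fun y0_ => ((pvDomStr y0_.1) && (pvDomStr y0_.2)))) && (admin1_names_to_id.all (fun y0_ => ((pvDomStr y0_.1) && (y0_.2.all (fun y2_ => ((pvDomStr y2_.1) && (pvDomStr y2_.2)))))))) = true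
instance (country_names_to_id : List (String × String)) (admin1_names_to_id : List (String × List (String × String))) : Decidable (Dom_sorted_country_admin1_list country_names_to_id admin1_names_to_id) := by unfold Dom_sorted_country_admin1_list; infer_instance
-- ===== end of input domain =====

-- B is one nested comprehension emitting all rows unsorted plus a single whole-tuple sort,
-- instead of A's accumulator loop with per-level sorting — objective: simpler.

def COUNTRIES_WITH_REGIONS : List String := ["AE", "US", "CA", "CN", "IN"]

-- ===== PORT A =====
-- dict[k] on the association list: first match; Pre_ excludes the KeyError case (missing key)
def sorted_country_admin1_list (country_names_to_id : List (String × String)) (admin1_names_to_id : List (String × List (String × String))) : List (String × String × String) :=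
  (PySem.List.sorted country_names_to_id (fun p => toLex p)).foldl
    (fun acc p =>
      let acc := acc ++ [(p.1, "", p.2)]
      if p.2 ∈ COUNTRIES_WITH_REGIONS then
        (PySem.List.sorted ((List.lookup p.2 admin1_names_to_id).getD []) (fun q => toLex q)).foldl
          (fun acc q => acc ++ [(p.1, q.1, p.2 ++ "-" ++ q.2)]) acc
      else acc) []

-- ===== PORT B =====
-- the nested comprehension is a flatMap: per country, the pair list ('', cc) :: admin1 pairs,
-- each pair turned into a triple with the country name in front; then one global sort
def sorted_country_admin1_list_alt (country_names_to_id : List (String × String)) (admin1_names_to_id : List (String × List (String × String))) : List (String × String × String) :=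
  PySem.List.sorted
    (country_names_to_id.flatMap (fun p =>
      (("", p.2) ::
        (if p.2 ∈ COUNTRIES_WITH_REGIONS then
          ((List.lookup p.2 admin1_names_to_id).getD []).map (fun q => (q.1, p.2 ++ "-" ++ q.2))
        else [])).map (fun r => (p.1, r.1, r.2))))
    (fun t => toLex (t.1, toLex t.2))

-- ===== PRECONDITION & SPEC =====
-- Pre_ excludes (a) inputs whose dict[country_code] access would raise KeyError (a region
-- country code with no admin1 entry), and (b) association lists with duplicate keys, which do
-- not arise from Python dicts (a dict's keys are unique).
def Pre_sorted_country_admin1_list (country_names_to_id : List (String × String)) (admin1_names_to_id : List (String × List (String × String))) : Prop :=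
  (country_names_to_id.map Prod.fst).Nodup ∧
  (∀ q ∈ admin1_names_to_id, (q.2.map Prod.fst).Nodup) ∧
  (∀ p ∈ country_names_to_id, p.2 ∈ COUNTRIES_WITH_REGIONS → p.2 ∈ admin1_names_to_id.map Prod.fst)
instance (country_names_to_id : List (String × String)) (admin1_names_to_id : List (String × List (String × String))) : Decidable (Pre_sorted_country_admin1_list country_names_to_id admin1_names_to_id) := by unfold Pre_sorted_country_admin1_list; infer_instance

def pvWitness_sorted_country_admin1_list : (List (String × String)) × (List (String × List (String × String))) :=
  ([("Utopia", "US"), ("Freedonia", "FD")], [("US", [("Alpha", "AL"), ("Beta", "BE")])])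

def Spec_sorted_country_admin1_list (country_names_to_id : List (String × String)) (admin1_names_to_id : List (String × List (String × String))) (out : List (String × String × String)) : Prop := out = sorted_country_admin1_list_alt country_names_to_id admin1_names_to_id
instance (country_names_to_id : List (String × String)) (admin1_names_to_id : List (String × List (String × String))) (out : List (String × String × String)) : Decidable (Spec_sorted_country_admin1_list country_names_to_id admin1_names_to_id out) := by unfold Spec_sorted_country_admin1_list; infer_instance

-- ===== CLAIM (what is proved, stated in full; the proofs are below) =====
def Claim_equal_sorted_country_admin1_list : Prop := ∀ (country_names_to_id : List (String × String)) (admin1_names_to_id : List (String × List (String × String))), Dom_sorted_country_admin1_list country_names_to_id admin1_names_to_id → Pre_sorted_country_admin1_list country_names_to_id admin1_names_to_id → Spec_sorted_country_admin1_list country_names_to_id admin1_names_to_id (sorted_country_admin1_list country_names_to_id admin1_names_to_id)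

-- ===== LEMMAS AND PROOFS =====

-- the row block one country entry contributes in A (admin1 block pre-sorted) and in B (unsorted)
def pvRowsA (admin1_names_to_id : List (String × List (String × String))) (p : String × String) : List (String × String × String) :=
  (p.1, "", p.2) :: (if p.2 ∈ COUNTRIES_WITH_REGIONS then
    (PySem.List.sorted ((List.lookup p.2 admin1_names_to_id).getD []) (fun q => toLex q)).map
      (fun q => (p.1, q.1, p.2 ++ "-" ++ q.2)) else [])

def pvRowsB (admin1_names_to_id : List (String × List (String × String))) (p : String × String) : List (String × String × String) :=
  (p.1, "", p.2) :: (if p.2 ∈ COUNTRIES_WITH_REGIONS then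
    ((List.lookup p.2 admin1_names_to_id).getD []).map
      (fun q => (p.1, q.1, p.2 ++ "-" ++ q.2)) else [])

def pvKey3 (t : String × String × String) : String ×ₗ (String ×ₗ String) := toLex (t.1, toLex t.2)

theorem pvFoldA (a : List (String × List (String × String))) (l : List (String × String)) (acc : List (String × String × String)) :
    l.foldl (fun acc p =>
      let acc := acc ++ [(p.1, "", p.2)]
      if p.2 ∈ COUNTRIES_WITH_REGIONS then
        (PySem.List.sorted ((List.lookup p.2 a).getD []) (fun q => toLex q)).foldl
          (fun acc q => acc ++ [(p.1, q.1, p.2 ++ "-" ++ q.2)]) acc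
      else acc) acc = acc ++ l.flatMap (pvRowsA a) := by
  have h : (fun (acc : List (String × String × String)) (p : String × String) =>
      let acc := acc ++ [(p.1, "", p.2)]
      if p.2 ∈ COUNTRIES_WITH_REGIONS then
        (PySem.List.sorted ((List.lookup p.2 a).getD []) (fun q => toLex q)).foldl
          (fun acc q => acc ++ [(p.1, q.1, p.2 ++ "-" ++ q.2)]) acc
      else acc) = fun acc p => acc ++ pvRowsA a p := by
    funext acc p
    by_cases hp : p.2 ∈ COUNTRIES_WITH_REGIONS <;>
      simp only [hp, pvRowsA, if_pos, PySem.List.foldl_append_singleton_eq_map] <;>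
      simp
  rw [h, PySem.List.foldl_append_eq_flatMap]

-- B's comprehension body is exactly pvRowsB
theorem pvAltRows (a : List (String × List (String × String))) (p : String × String) :
    (("", p.2) ::
      (if p.2 ∈ COUNTRIES_WITH_REGIONS then
        ((List.lookup p.2 a).getD []).map (fun q => (q.1, p.2 ++ "-" ++ q.2))
      else [])).map (fun r : String × String => (p.1, r.1, r.2)) = pvRowsB a p := by
  by_cases hp : p.2 ∈ COUNTRIES_WITH_REGIONS <;>
    simp [pvRowsB, hp, List.map_map, Function.comp]

-- every row a country entry contributes carries that country's name as first component
theorem pvRowsA_fst (a : List (String × List (String × String))) (p : String × String)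
    (x : String × String × String) (hx : x ∈ pvRowsA a p) : x.1 = p.1 := by
  unfold pvRowsA at hx
  rcases List.mem_cons.mp hx with hx | hx
  · rw [hx]
  · split at hx
    · rcases List.mem_map.mp hx with ⟨q, _, hq⟩
      rw [← hq]
    · simp at hx

-- a nonempty string appended on the right strictly increases a string (List.Lex is String.<)
theorem pvLt_append (s t : String) (ht : t.toList ≠ []) : s < s ++ t := by
  rw [String.lt_iff_toList_lt]
  have : ∀ (l : List Char), List.Lex (· < ·) l (l ++ t.toList) := by
    intro l
    induction l with
    | nil =>
      cases h : t.toList with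
      | nil => exact absurd h ht
      | cons c cs => rw [List.nil_append]; exact List.Lex.nil
    | cons c cs ih => exact List.Lex.cons ih
  simpa using this s.toList

theorem pvEmpty_lt (s : String) (hs : s ≠ "") : "" < s := by
  rw [String.lt_iff_toList_lt]
  cases h : s.toList with
  | nil => exact absurd (by ext1; simp [h]) hs
  | cons c cs => exact List.Lex.nil

theorem pvLookup_of_mem_fst (a : List (String × List (String × String))) (k : String)
    (hk : k ∈ a.map Prod.fst) : ∃ v, List.lookup k a = some v ∧ (k, v) ∈ a := by
  induction a with
  | nil => simp at hk
  | cons hd tl ih =>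
    by_cases h : k = hd.1
    · exact ⟨hd.2, by simp [List.lookup, h], by simp [h]⟩
    · rcases ih (by rcases List.mem_map.mp hk with ⟨q, hq, hq1⟩
                    rcases List.mem_cons.mp hq with hq | hq
                    · exact absurd (hq ▸ hq1).symm h
                    · exact List.mem_map.mpr ⟨q, hq, hq1⟩) with ⟨v, hv, hmem⟩
      exact ⟨v, by simpa [List.lookup, beq_false_of_ne h] using hv, List.mem_cons_of_mem _ hmem⟩

-- each country block of A is strictly increasing under the full-tuple key
theorem pvRowsA_pairwise (a : List (String × List (String × String))) (p : String × String)
    (hinner : ∀ q ∈ a, (q.2.map Prod.fst).Nodup) (hkey : p.2 ∈ COUNTRIES_WITH_REGIONS → p.2 ∈ a.map Prod.fst) :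
    (pvRowsA a p).Pairwise (fun x y => pvKey3 x < pvKey3 y) := by
  unfold pvRowsA
  by_cases hp : p.2 ∈ COUNTRIES_WITH_REGIONS
  · rcases pvLookup_of_mem_fst a p.2 (hkey hp) with ⟨v, hv, hmem⟩
    simp only [hp, if_pos]
    constructor
    · -- the country row precedes every admin1 row
      intro y hy
      rcases List.mem_map.mp hy with ⟨q, _, hq⟩
      rw [← hq]
      unfold pvKey3
      rw [Prod.Lex.lt_iff]
      right
      refine ⟨rfl, ?_⟩
      rw [Prod.Lex.lt_iff]
      by_cases hq1 : q.1 = ""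
      · right
        refine ⟨hq1.symm, ?_⟩
        simpa using pvLt_append p.2 ("-" ++ q.2) (by simp)
      · left
        simpa using pvEmpty_lt q.1 hq1
    · -- admin1 rows are strictly increasing: sorted by (name, code) with distinct names
      rw [List.pairwise_map]
      have hnd : ((PySem.List.sorted ((List.lookup p.2 a).getD []) (fun q => toLex q)).map Prod.fst).Nodup := by
        have h1 : ((List.lookup p.2 a).getD [] : List (String × String)).map Prod.fst |>.Nodup := by
          rw [hv]; exact hinner (p.2, v) hmem
        exact (((PySem.List.sorted_perm _ _ _).map Prod.fst).nodup_iff).mpr h1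
      have hle := PySem.List.sorted_pairwise ((List.lookup p.2 a).getD []) (fun q => toLex q)
      have hne : (PySem.List.sorted ((List.lookup p.2 a).getD []) (fun q => toLex q)).Pairwise
          (fun q1 q2 => q1.1 ≠ q2.1) := by
        have := List.pairwise_map.mp hnd
        exact this
      refine (hle.and hne).imp ?_
      intro q1 q2 hq
      unfold pvKey3
      rw [Prod.Lex.lt_iff]
      right
      refine ⟨rfl, ?_⟩
      rw [Prod.Lex.lt_iff]
      left
      have := hq.1
      rw [Prod.Lex.le_iff] at this
      rcases this with h | h
      · simpa using h
      · exact absurd (by simpa using h.1) hq.2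
  · simp [hp]

-- ===== VERDICT (by name: the statement is the Claim_ definition above) =====
theorem sorted_country_admin1_list_spec : Claim_equal_sorted_country_admin1_list := by
  intro c a _hdom hpre
  obtain ⟨hnd, hinner, hkey⟩ := hpre
  unfold Spec_sorted_country_admin1_list sorted_country_admin1_list sorted_country_admin1_list_alt
  rw [pvFoldA]
  simp only [pvAltRows, List.nil_append]
  -- B = sorted(flat) equals A's list: A's list is a permutation of flat and strictly sorted
  refine (PySem.List.sorted_eq_of_perm_of_pairwise_lt _ _ pvKey3 ?_ ?_).symm
  · -- permutation
    refine List.Perm.trans ?_ (List.Perm.flatMap_right (pvRowsB a) (PySem.List.sorted_perm c (fun p => toLex p) false))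
    refine List.Perm.flatMap_left _ ?_
    intro p _
    unfold pvRowsA pvRowsB
    refine List.Perm.cons _ ?_
    split
    · exact (PySem.List.sorted_perm _ _ _).map _
    · exact List.Perm.refl _
  · -- strictly increasing
    rw [List.pairwise_flatMap]
    constructor
    · intro p hp
      exact pvRowsA_pairwise a p hinner
        (fun h => hkey p ((PySem.List.mem_sorted _ _ _ _).mp hp) h)
    · have hle := PySem.List.sorted_pairwise c (fun p => toLex p)
      have hnd' : ((PySem.List.sorted c (fun p => toLex p)).map Prod.fst).Nodup :=
        (((PySem.List.sorted_perm c (fun p => toLex p) false).map Prod.fst).nodup_iff).mpr hnd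
      have hne : (PySem.List.sorted c (fun p => toLex p)).Pairwise (fun p1 p2 => p1.1 ≠ p2.1) :=
        List.pairwise_map.mp hnd'
      refine (hle.and hne).imp ?_
      intro p1 p2 hp x hx y hy
      unfold pvKey3
      rw [Prod.Lex.lt_iff]
      left
      rw [pvRowsA_fst a p1 x hx, pvRowsA_fst a p2 y hy]
      have := hp.1
      rw [Prod.Lex.le_iff] at this
      rcases this with h | h
      · simpa using h
      · exact absurd (by simpa using h.1) hp.2
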